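-- pv_equiv track=rewrite | github.com/owusunp/applied | car_passing_problem.py | count_car_passings_optimized
-- ===== SOURCE A (Python) =====
-- def count_car_passings_optimized(cars):
--     """
--     Optimized version using prefix sum for O(n) time complexity.
--     """
--     # Count east-bound cars (0) at each position
--     east_count = 0  # Count of east-bound cars seen so far - tracks east-bound cars to the left
--     passings = 0  # Total number of passings - our answer
--
--     for car in cars:  # Iterate through each car in the sequence
--         if car == 0:  # If current car is east-bound (0) - increment east-bound counter
--             east_count += 1  # Increment count of east-bound cars - track how many we've seen
--         else:  # If current car is west-bound (1) - count passings with all east-bound cars to its left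
--             passings += east_count  # Add all east-bound cars to the left - each creates a passing
--
--     return passings  # Return total number of passings - the answer to the problem
-- ===== SOURCE B (Python) =====
-- def count_car_passings_optimized(cars):
--     # Divide and conquer: split the list in half; every passing pair is either
--     # entirely in one half, or an east-bound car (0) in the left half paired
--     # with a west-bound car (non-zero) in the right half.
--     def solve(seq):
--         n = len(seq)
--         if n == 0:
--             return (0, 0)
--         if n == 1:
--             return (1, 0) if seq[0] == 0 else (0, 0)
--         mid = n // 2
--         zl, pl = solve(seq[:mid])
--         zr, pr = solve(seq[mid:])
--         return (zl + zr, pl + pr + zl * ((n - mid) - zr))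
--     return solve(list(cars))[1]
-- ===== Notes on version B (the rewrite author's own statement) =====
-- stated objective: alternative
-- what changed: B replaces A's single accumulator pass by a divide-and-conquer recursion: split the list in half, recurse, and combine with zeros(left) * nonzeros(right) for the cross pairs.
import Mathlib
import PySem

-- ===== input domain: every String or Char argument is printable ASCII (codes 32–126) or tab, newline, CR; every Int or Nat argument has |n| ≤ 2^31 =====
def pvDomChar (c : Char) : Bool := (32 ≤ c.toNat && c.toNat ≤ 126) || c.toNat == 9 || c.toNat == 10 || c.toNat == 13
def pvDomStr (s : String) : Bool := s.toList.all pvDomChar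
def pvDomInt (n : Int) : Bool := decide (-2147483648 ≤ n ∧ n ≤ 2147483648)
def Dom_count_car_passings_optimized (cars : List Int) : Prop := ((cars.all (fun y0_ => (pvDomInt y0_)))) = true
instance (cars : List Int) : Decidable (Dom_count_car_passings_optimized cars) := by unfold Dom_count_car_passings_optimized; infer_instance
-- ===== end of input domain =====

-- B replaces A's single accumulator pass by a divide-and-conquer recursion
-- (halve, recurse, add zeros(left) * nonzeros(right)); alternative, not faster.

-- ===== PORT A =====
-- A: single left-to-right loop, state (east_count, passings)
def count_car_passings_optimized (cars : List Int) : Int :=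
  (cars.foldl
    (fun (st : Int × Int) car =>
      if car = 0 then (st.1 + 1, st.2) else (st.1, st.2 + st.1))
    (0, 0)).2

-- ===== PORT B =====
-- B's solve: returns (zeros in seq, passings in seq)
-- fuel = length bound, making the halving recursion structural (a pure totality guard)
def pvSolveF : Nat → List Int → Int × Int
  | 0, _ => (0, 0)
  | fuel + 1, xs =>
    if xs.length = 0 then (0, 0)
    else if xs.length = 1 then
      (if xs.headI = 0 then (1, 0) else (0, 0))
    else
      ((pvSolveF fuel (xs.take (xs.length / 2))).1 + (pvSolveF fuel (xs.drop (xs.length / 2))).1,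
       (pvSolveF fuel (xs.take (xs.length / 2))).2 + (pvSolveF fuel (xs.drop (xs.length / 2))).2
         + (pvSolveF fuel (xs.take (xs.length / 2))).1
           * (((xs.length : Int) - ((xs.length / 2 : Nat) : Int))
              - (pvSolveF fuel (xs.drop (xs.length / 2))).1))

def pvSolve (xs : List Int) : Int × Int := pvSolveF xs.length xs

def count_car_passings_optimized_alt (cars : List Int) : Int :=
  (pvSolve cars).2

-- ===== PRECONDITION & SPEC =====
def Spec_count_car_passings_optimized (cars : List Int) (out : Int) : Prop := out = count_car_passings_optimized_alt cars
instance (cars : List Int) (out : Int) : Decidable (Spec_count_car_passings_optimized cars out) := by unfold Spec_count_car_passings_optimized; infer_instance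

-- ===== CLAIM (what is proved, stated in full; the proofs are below) =====
def Claim_equal_count_car_passings_optimized : Prop := ∀ (cars : List Int), Dom_count_car_passings_optimized cars → Spec_count_car_passings_optimized cars (count_car_passings_optimized cars)

-- ===== LEMMAS AND PROOFS =====

-- zeros, nonzeros, and the pair count, defined structurally
def pvZ : List Int → Int
  | [] => 0
  | x :: r => (if x = 0 then 1 else 0) + pvZ r

def pvW : List Int → Int
  | [] => 0
  | x :: r => (if x = 0 then 0 else 1) + pvW r

def pvP : List Int → Int
  | [] => 0
  | x :: r => (if x = 0 then pvW r else 0) + pvP r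

theorem pvA_loop (xs : List Int) : ∀ e p : Int,
    (xs.foldl
      (fun (st : Int × Int) car =>
        if car = 0 then (st.1 + 1, st.2) else (st.1, st.2 + st.1))
      (e, p)) = (e + pvZ xs, p + e * pvW xs + pvP xs) := by
  induction xs with
  | nil => intro e p; simp [pvZ, pvW, pvP]
  | cons x r ih =>
    intro e p
    by_cases h : x = 0 <;>
      simp only [List.foldl_cons, h, if_true, if_false, reduceIte, ih, pvZ, pvW, pvP,
        Prod.mk.injEq] <;> constructor <;> ring

theorem pvZ_append (l r : List Int) : pvZ (l ++ r) = pvZ l + pvZ r := by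
  induction l with
  | nil => simp [pvZ]
  | cons x t ih => simp [pvZ, ih]; ring

theorem pvW_append (l r : List Int) : pvW (l ++ r) = pvW l + pvW r := by
  induction l with
  | nil => simp [pvW]
  | cons x t ih => simp [pvW, ih]; ring

theorem pvP_append (l r : List Int) : pvP (l ++ r) = pvP l + pvP r + pvZ l * pvW r := by
  induction l with
  | nil => simp [pvP, pvZ]
  | cons x t ih =>
    by_cases h : x = 0 <;>
      simp [pvP, pvZ, pvW_append, ih, h] <;> ring

theorem pvZW_len (xs : List Int) : pvZ xs + pvW xs = (xs.length : Int) := by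
  induction xs with
  | nil => simp [pvZ, pvW]
  | cons x r ih =>
    by_cases h : x = 0 <;> simp [pvZ, pvW, h] <;> omega

theorem pvSolveF_eq : ∀ (fuel : Nat) (xs : List Int), xs.length ≤ fuel →
    pvSolveF fuel xs = (pvZ xs, pvP xs) := by
  intro fuel
  induction fuel with
  | zero =>
    intro xs h
    obtain rfl : xs = [] := List.length_eq_zero_iff.mp (Nat.le_zero.mp h)
    simp [pvSolveF, pvZ, pvP]
  | succ n ih =>
    intro xs h
    by_cases h0 : xs.length = 0
    · obtain rfl : xs = [] := List.length_eq_zero_iff.mp h0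
      simp [pvSolveF, pvZ, pvP]
    · by_cases h1 : xs.length = 1
      · obtain ⟨x, rfl⟩ := List.length_eq_one_iff.mp h1
        by_cases hx : x = 0 <;> simp [pvSolveF, pvZ, pvP, pvW, hx]
      · have hlen2 : 2 ≤ xs.length := by omega
        have htk : (xs.take (xs.length / 2)).length ≤ n := by
          simp only [List.length_take]; omega
        have hdr : (xs.drop (xs.length / 2)).length ≤ n := by
          simp only [List.length_drop]; omega
        simp only [pvSolveF, h0, h1, if_false, ih _ htk, ih _ hdr]
        have hsplit : xs = xs.take (xs.length / 2) ++ xs.drop (xs.length / 2) :=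
          (List.take_append_drop _ _).symm
        have hz := pvZ_append (xs.take (xs.length / 2)) (xs.drop (xs.length / 2))
        have hp := pvP_append (xs.take (xs.length / 2)) (xs.drop (xs.length / 2))
        have hl := pvZW_len (xs.drop (xs.length / 2))
        have hlen : (xs.drop (xs.length / 2)).length = xs.length - xs.length / 2 := by
          simp [List.length_drop]
        rw [hlen] at hl
        have h2 : xs.length / 2 ≤ xs.length := Nat.div_le_self _ _
        refine Prod.ext ?_ ?_
        · simp only []
          conv_rhs => rw [hsplit]
          rw [hz]
        · simp only []
          conv_rhs => rw [hsplit]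
          rw [hp]
          have hc : ((xs.length : Int) - ((xs.length / 2 : Nat) : Int))
              = pvZ (xs.drop (xs.length / 2)) + pvW (xs.drop (xs.length / 2)) := by
            rw [hl]; push_cast [Nat.cast_sub h2]; ring
          rw [hc]; ring

theorem pvSolve_eq (xs : List Int) : pvSolve xs = (pvZ xs, pvP xs) :=
  pvSolveF_eq xs.length xs le_rfl

-- ===== VERDICT (by name: the statement is the Claim_ definition above) =====
theorem count_car_passings_optimized_spec : Claim_equal_count_car_passings_optimized := by
  intro cars _
  unfold Spec_count_car_passings_optimized count_car_passings_optimized count_car_passings_optimized_alt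
  rw [pvA_loop, pvSolve_eq]
  simp
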